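-- pv_equiv track=rewrite | github.com/NimaFathi/Bioinformatics-Rosalind-Textbook | BookProblems/Chapter 5/ManhatanProblem(BA5B)/BA5B.py | manhatan_tourist
-- ===== SOURCE A (Python) =====
-- def manhatan_tourist(n,m,down,right):
--     array = [[0 for _ in range(m+1)]for _ in range(n+1)]
--     for i in range(1, m+1):
--         array[0][i] = array[0][i-1] + right[0][i-1]
--     for i in range(1, n+1):
--         array[i][0] = array[i-1][0] + down[i-1][0]
--     for i in range(1, n+1):
--         for j in range(1,m+1):
--             array[i][j] = max(array[i-1][j] + down[i-1][j], array[i][j-1] + right[i][j-1])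
--     return array[n][m]
-- ===== SOURCE B (Python) =====
-- def manhatan_tourist(n, m, down, right):
--     # top-down demand-driven: memoized recursion from the target corner (n, m)
--     memo = {}
--
--     def best(i, j):
--         if (i, j) in memo:
--             return memo[(i, j)]
--         if i == 0 and j == 0:
--             v = 0
--         elif i == 0:
--             v = best(0, j - 1) + right[0][j - 1]
--         elif j == 0:
--             v = best(i - 1, 0) + down[i - 1][0]
--         else:
--             v = max(best(i - 1, j) + down[i - 1][j],
--                     best(i, j - 1) + right[i][j - 1])
--         memo[(i, j)] = v
--         return v
--
--     return best(n, m)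
-- ===== Notes on version B (the rewrite author's own statement) =====
-- stated objective: alternative
-- what changed: Replaces A's bottom-up table fill (three index-assignment loops over a preallocated (n+1)x(m+1) array) with a top-down demand-driven memoized recursion best(i,j) started at the target corner (n,m), caching results in a dict.
import Mathlib
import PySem

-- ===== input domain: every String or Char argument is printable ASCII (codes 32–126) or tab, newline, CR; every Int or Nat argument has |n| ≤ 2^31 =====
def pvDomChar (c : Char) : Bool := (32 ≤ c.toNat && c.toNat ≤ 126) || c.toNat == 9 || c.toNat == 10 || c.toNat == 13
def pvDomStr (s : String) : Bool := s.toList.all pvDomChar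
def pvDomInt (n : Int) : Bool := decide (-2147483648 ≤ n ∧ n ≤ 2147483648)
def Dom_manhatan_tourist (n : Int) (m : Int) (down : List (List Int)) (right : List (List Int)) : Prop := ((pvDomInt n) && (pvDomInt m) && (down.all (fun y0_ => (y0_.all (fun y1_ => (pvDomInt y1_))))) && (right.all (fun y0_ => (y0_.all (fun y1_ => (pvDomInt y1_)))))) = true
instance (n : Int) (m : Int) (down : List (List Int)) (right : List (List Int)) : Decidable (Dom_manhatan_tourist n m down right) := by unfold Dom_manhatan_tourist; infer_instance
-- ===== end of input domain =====

-- B replaces A's bottom-up table fill (three index-assignment loops over a preallocated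
-- (n+1)×(m+1) array) with a top-down memoized recursion started at the target corner (n,m).

-- shared indexing helper: 'xs[i][j]' (exact for the nonnegative in-range reads the
-- programs perform wherever Python A returns; Pre_ excludes the raising inputs)
def pvIdx2 (a : List (List Int)) (i j : Int) : Int :=
  PySem.List.pyGetD (PySem.List.pyGetD a i []) j 0

-- ===== PORT A =====
-- 'array[i][j] = v' (i, j nonnegative and in range wherever A returns)
def pvSet2 (a : List (List Int)) (i j : Int) (v : Int) : List (List Int) :=
  PySem.List.pySetD a i (PySem.List.pySetD (PySem.List.pyGetD a i []) j v)

def manhatan_tourist (n : Int) (m : Int) (down : List (List Int)) (right : List (List Int)) : Int :=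
  let a0 := List.replicate (n+1).toNat (List.replicate (m+1).toNat (0 : Int))
  let a1 := (PySem.List.pyRange 1 (m+1) 1).foldl
    (fun a i => pvSet2 a 0 i (pvIdx2 a 0 (i-1) + pvIdx2 right 0 (i-1))) a0
  let a2 := (PySem.List.pyRange 1 (n+1) 1).foldl
    (fun a i => pvSet2 a i 0 (pvIdx2 a (i-1) 0 + pvIdx2 down (i-1) 0)) a1
  let a3 := (PySem.List.pyRange 1 (n+1) 1).foldl (fun a i =>
    (PySem.List.pyRange 1 (m+1) 1).foldl (fun a j =>
      pvSet2 a i j (max (pvIdx2 a (i-1) j + pvIdx2 down (i-1) j)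
                        (pvIdx2 a i (j-1) + pvIdx2 right i (j-1)))) a) a2
  pvIdx2 a3 n m

-- ===== PORT B =====
-- Source B's recursion 'best(i, j)' with its dict memo threaded through (state-passing
-- style; branch order as in the Python: memo hit, (0,0), i==0, j==0, interior).
-- Indices are Nat here: exact for the nonnegative n, m admitted by Pre_.
def pvBestMemo (down right : List (List Int)) :
    Nat → Nat → PySem.Dict (Int × Int) Int → Int × PySem.Dict (Int × Int) Int
  | i, j, memo =>
    match memo.get? ((i : Int), (j : Int)) with
    | some v => (v, memo)
    | none =>
      match i, j with
      | 0, 0 => (0, memo.insert ((0 : Int), (0 : Int)) 0)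
      | 0, j+1 =>
          let (w, memo') := pvBestMemo down right 0 j memo
          let v := w + pvIdx2 right 0 (j : Int)
          (v, memo'.insert ((0 : Int), ((j : Int)+1)) v)
      | i+1, 0 =>
          let (w, memo') := pvBestMemo down right i 0 memo
          let v := w + pvIdx2 down (i : Int) 0
          (v, memo'.insert (((i : Int)+1), (0 : Int)) v)
      | i+1, j+1 =>
          let (wu, m1) := pvBestMemo down right i (j+1) memo
          let (wl, m2) := pvBestMemo down right (i+1) j m1
          let v := max (wu + pvIdx2 down (i : Int) ((j : Int)+1))
                       (wl + pvIdx2 right ((i : Int)+1) (j : Int))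
          (v, m2.insert (((i : Int)+1), ((j : Int)+1)) v)
  termination_by i j _ => (i, j)

def manhatan_tourist_alt (n : Int) (m : Int) (down : List (List Int)) (right : List (List Int)) : Int :=
  (pvBestMemo down right n.toNat m.toNat PySem.Dict.empty).1

-- ===== PRECONDITION & SPEC =====
-- Pre_: exactly the inputs on which the Python A returns (elsewhere it raises
-- IndexError: negative n or m, or down/right too short for the indices the loops use).
def Pre_manhatan_tourist (n : Int) (m : Int) (down : List (List Int)) (right : List (List Int)) : Prop :=
  0 ≤ n ∧ 0 ≤ m ∧
  n.toNat ≤ down.length ∧ (∀ r ∈ down.take n.toNat, m.toNat + 1 ≤ r.length) ∧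
  (m = 0 ∨ (n.toNat + 1 ≤ right.length ∧ ∀ r ∈ right.take (n.toNat + 1), m.toNat ≤ r.length))
instance (n : Int) (m : Int) (down : List (List Int)) (right : List (List Int)) : Decidable (Pre_manhatan_tourist n m down right) := by unfold Pre_manhatan_tourist; infer_instance

def pvWitness_manhatan_tourist : Int × Int × List (List Int) × List (List Int) :=
  (1, 1, [[3, 4]], [[5], [6]])

def Spec_manhatan_tourist (n : Int) (m : Int) (down : List (List Int)) (right : List (List Int)) (out : Int) : Prop := out = manhatan_tourist_alt n m down right
instance (n : Int) (m : Int) (down : List (List Int)) (right : List (List Int)) (out : Int) : Decidable (Spec_manhatan_tourist n m down right out) := by unfold Spec_manhatan_tourist; infer_instance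

-- ===== CLAIM (what is proved, stated in full; the proofs are below) =====
def Claim_equal_manhatan_tourist : Prop := ∀ (n : Int) (m : Int) (down : List (List Int)) (right : List (List Int)), Dom_manhatan_tourist n m down right → Pre_manhatan_tourist n m down right → Spec_manhatan_tourist n m down right (manhatan_tourist n m down right)

-- ===== LEMMAS AND PROOFS =====

-- Nat-indexed 2D read/write (what the ports' Int indexing reduces to on the loops)
def pvG (a : List (List Int)) (i j : Nat) : Int := (a.getD i []).getD j 0
def pvSetG (a : List (List Int)) (i j : Nat) (v : Int) : List (List Int) :=
  a.set i ((a.getD i []).set j v)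

-- the max-weight path value both programs compute
def pvBest (down right : List (List Int)) : Nat → Nat → Int
  | 0, 0 => 0
  | 0, j+1 => pvBest down right 0 j + pvG right 0 j
  | i+1, 0 => pvBest down right i 0 + pvG down i 0
  | i+1, j+1 => max (pvBest down right i (j+1) + pvG down i (j+1))
                    (pvBest down right (i+1) j + pvG right (i+1) j)
  termination_by i j => (i, j)

theorem pvBest_00 (d r : List (List Int)) : pvBest d r 0 0 = 0 := by simp [pvBest]
theorem pvBest_0S (d r : List (List Int)) (j : Nat) :
    pvBest d r 0 (j+1) = pvBest d r 0 j + pvG r 0 j := by simp [pvBest]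
theorem pvBest_S0 (d r : List (List Int)) (i : Nat) :
    pvBest d r (i+1) 0 = pvBest d r i 0 + pvG d i 0 := by simp [pvBest]
theorem pvBest_SS (d r : List (List Int)) (i j : Nat) :
    pvBest d r (i+1) (j+1) = max (pvBest d r i (j+1) + pvG d i (j+1))
                                 (pvBest d r (i+1) j + pvG r (i+1) j) := by simp [pvBest]

-- bridges from the ports' Int indexing to Nat indexing
theorem bset0 {α : Type} [Inhabited α] (xs : List α) (v : α) :
    PySem.List.pySetD xs (0:Int) v = xs.set 0 v := PySem.List.pySetD_natCast xs 0 v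
theorem bsetS1 {α : Type} [Inhabited α] (xs : List α) (t : Nat) (v : α) :
    PySem.List.pySetD xs (1+(t:Int)) v = xs.set (t+1) v := by
  rw [show (1+(t:Int)) = ((t+1:Nat):Int) by push_cast; ring, PySem.List.pySetD_natCast]
theorem bgetS1 {α : Type} [Inhabited α] (xs : List α) (t : Nat) (d : α) :
    PySem.List.pyGetD xs (1+(t:Int)) d = xs.getD (t+1) d := by
  rw [show (1+(t:Int)) = ((t+1:Nat):Int) by push_cast; ring, PySem.List.pyGetD_natCast]
theorem bgetS (xs : List (List Int)) (t : Nat) (d : List Int) :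
    PySem.List.pyGetD xs ((t:Int)+1) d = xs.getD (t+1) d := by
  rw [show ((t:Int)+1) = ((t+1:Nat):Int) by push_cast; ring, PySem.List.pyGetD_natCast]
theorem bget_sub {α : Type} [Inhabited α] (xs : List α) (t : Nat) (d : α) :
    PySem.List.pyGetD xs (1+(t:Int)-1) d = xs.getD t d := by
  rw [show (1+(t:Int)-1) = ((t:Nat):Int) by push_cast; ring, PySem.List.pyGetD_natCast]

-- how a write reads back
theorem pvG_setG (a : List (List Int)) (i j : Nat) (v : Int) (i' j' : Nat) :
    pvG (pvSetG a i j v) i' j' =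
      if i' = i ∧ j' = j ∧ i < a.length ∧ j < (a.getD i []).length then v
      else pvG a i' j' := by
  unfold pvG pvSetG
  simp only [List.getD_eq_getElem?_getD, List.getElem?_set]
  by_cases hi : i = i'
  · subst hi
    by_cases hl : i < a.length
    · have hrow : a[i]?.getD ([]:List Int) = a[i] := by simp [List.getElem?_eq_getElem hl]
      simp only [if_pos rfl, if_pos hl, Option.getD_some, hrow, hl, and_true, true_and,
        if_true, and_self]
      rw [List.getElem?_set]
      by_cases hj : j = j'
      · subst hj
        by_cases hjl : j < a[i].length
        · simp [hjl]
        · have h2 : a[i][j]? = none := List.getElem?_eq_none (by omega)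
          simp [hjl, h2]
      · rw [if_neg (show ¬(j' = j ∧ j < a[i].length) from fun h => hj h.1.symm)]
        simp [List.getElem?_set, fun h : j = j' => hj h]
    · have h1 : a[i]? = none := List.getElem?_eq_none (by omega)
      simp [hl, h1]
  · have hc : ¬(i' = i ∧ j' = j ∧ i < a.length ∧ j < (a[i]?.getD []).length) :=
      fun h => hi h.1.symm
    rw [if_neg hi, if_neg hc]

def pvShape (a : List (List Int)) (N M : Nat) : Prop :=
  a.length = N+1 ∧ ∀ i : Nat, i < N+1 → (a.getD i []).length = M+1

theorem pvShape_setG {a : List (List Int)} {N M : Nat} (h : pvShape a N M)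
    (i j : Nat) (v : Int) : pvShape (pvSetG a i j v) N M := by
  obtain ⟨h1, h2⟩ := h
  refine ⟨by simp [pvSetG, h1], ?_⟩
  intro i' hi'
  unfold pvSetG
  rcases Nat.lt_or_ge i a.length with hl | hl
  · have key : (a.set i ((a.getD i []).set j v)).getD i' []
        = if i = i' then (a.getD i []).set j v else a.getD i' [] := by
      by_cases hii : i = i'
      · subst hii; simp [List.getD_eq_getElem?_getD, List.getElem?_set, hl]
      · simp [List.getD_eq_getElem?_getD, List.getElem?_set, hii]
    rw [key]; split_ifs with hii
    · subst hii
      have hh := h2 i hi'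
      simp only [List.getD_eq_getElem?_getD] at hh ⊢
      simp [hh]
    · exact h2 i' hi'
  · have hii : i ≠ i' := by omega
    have key : (a.set i ((a.getD i []).set j v)).getD i' [] = a.getD i' [] := by
      simp [List.getD_eq_getElem?_getD, List.getElem?_set, hii]
    rw [key]; exact h2 i' hi'

def pvInit (N M : Nat) : List (List Int) :=
  List.replicate (N+1) (List.replicate (M+1) (0:Int))

theorem pvShape_init (N M : Nat) : pvShape (pvInit N M) N M := by
  refine ⟨by simp [pvInit], ?_⟩
  intro i hi
  simp [pvInit, List.getD_eq_getElem?_getD, List.getElem?_replicate, hi]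

theorem pvG_init (N M : Nat) (i j : Nat) : pvG (pvInit N M) i j = 0 := by
  unfold pvG pvInit
  simp only [List.getD_eq_getElem?_getD, List.getElem?_replicate]
  split_ifs <;> simp [List.getElem?_replicate] <;> split_ifs <;> simp

-- loop bodies of A in Nat form
def pvStep1 (right : List (List Int)) (a : List (List Int)) (t : Nat) : List (List Int) :=
  pvSetG a 0 (t+1) (pvG a 0 t + pvG right 0 t)
def pvStep2 (down : List (List Int)) (a : List (List Int)) (t : Nat) : List (List Int) :=
  pvSetG a (t+1) 0 (pvG a t 0 + pvG down t 0)
def pvStep3 (down right : List (List Int)) (t : Nat) (a : List (List Int)) (s : Nat) : List (List Int) :=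
  pvSetG a (t+1) (s+1) (max (pvG a t (s+1) + pvG down t (s+1)) (pvG a (t+1) s + pvG right (t+1) s))
def pvOuter3 (down right : List (List Int)) (M : Nat) (a : List (List Int)) (t : Nat) : List (List Int) :=
  (List.range M).foldl (pvStep3 down right t) a

theorem a_norm (n m : Int) (down right : List (List Int)) (hn : 0 ≤ n) (hm : 0 ≤ m) :
    manhatan_tourist n m down right =
      pvG ((List.range n.toNat).foldl (pvOuter3 down right m.toNat)
            ((List.range n.toNat).foldl (pvStep2 down)
              ((List.range m.toNat).foldl (pvStep1 right) (pvInit n.toNat m.toNat))))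
          n.toNat m.toNat := by
  obtain ⟨N, rfl⟩ : ∃ N : Nat, n = (N:Int) := ⟨n.toNat, (Int.toNat_of_nonneg hn).symm⟩
  obtain ⟨M, rfl⟩ : ∃ M : Nat, m = (M:Int) := ⟨m.toNat, (Int.toNat_of_nonneg hm).symm⟩
  have hr : ∀ K : Nat, PySem.List.pyRange 1 ((K:Int)+1) 1
      = (List.range K).map (fun k : Nat => 1+(k:Int)) := by
    intro K; rw [PySem.List.pyRange_one]; norm_num
  unfold manhatan_tourist
  rw [hr, hr]
  simp only [Int.toNat_natCast, List.foldl_map,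
    show ((M:Int)+1).toNat = M+1 by omega, show ((N:Int)+1).toNat = N+1 by omega]
  simp only [pvOuter3, pvStep1, pvStep2, pvStep3, pvSetG, pvG, pvInit, pvSet2, pvIdx2,
    bset0, bsetS1, bgetS1, bgetS, bget_sub, PySem.List.pyGetD_natCast, PySem.List.pyGetD_ofNat',
    List.foldl_map]
  rfl

-- ===== B-side: the memo only ever holds correct values =====

def pvInv (down right : List (List Int)) (memo : PySem.Dict (Int × Int) Int) : Prop :=
  ∀ (a b : Nat) (v : Int), memo.get? ((a : Int), (b : Int)) = some v → v = pvBest down right a b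

theorem pvInv_empty (down right : List (List Int)) : pvInv down right PySem.Dict.empty := by
  intro a b v h
  rw [PySem.Dict.get?_empty] at h
  exact absurd h (by simp)

theorem pvInv_insert {down right : List (List Int)} {memo : PySem.Dict (Int × Int) Int}
    (h : pvInv down right memo) (a b : Nat) :
    pvInv down right (memo.insert ((a : Int), (b : Int)) (pvBest down right a b)) := by
  intro a' b' v hv
  rw [PySem.Dict.get?_insert] at hv
  split_ifs at hv with he
  · have ha : a' = a ∧ b' = b := by
      constructor <;> [skip; skip] <;>
      · have := congrArg Prod.fst he
        have := congrArg Prod.snd he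
        omega
    obtain ⟨rfl, rfl⟩ := ha
    exact (Option.some_injective _ hv).symm ▸ by injection hv with h'; omega
  · exact h a' b' v hv

theorem pvBestMemo_correct (down right : List (List Int)) :
    ∀ (k i j : Nat), i + j = k → ∀ memo, pvInv down right memo →
      (pvBestMemo down right i j memo).1 = pvBest down right i j ∧
      pvInv down right (pvBestMemo down right i j memo).2 := by
  intro k
  induction k with
  | zero =>
      intro i j hij memo hinv
      obtain ⟨rfl, rfl⟩ : i = 0 ∧ j = 0 := by omega
      cases hget : memo.get? (((0:Nat) : Int), ((0:Nat) : Int)) with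
      | some v =>
          rw [pvBestMemo.eq_def]
          simp only [hget]
          exact ⟨hinv 0 0 v hget, hinv⟩
      | none =>
          rw [pvBestMemo.eq_def]
          simp only [hget]
          refine ⟨by rw [pvBest_00], ?_⟩
          have h := pvInv_insert hinv 0 0
          rw [pvBest_00] at h
          simpa using h
  | succ k ih =>
      intro i j hij memo hinv
      match i, j with
      | 0, 0 => omega
      | 0, j+1 =>
          cases hget : memo.get? (((0:Nat) : Int), ((j+1:Nat) : Int)) with
          | some v =>
              rw [pvBestMemo.eq_def]
              simp only [hget]
              exact ⟨hinv 0 (j+1) v hget, hinv⟩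
          | none =>
              obtain ⟨h1, h2⟩ := ih 0 j (by omega) memo hinv
              rw [pvBestMemo.eq_def]
              simp only [hget, h1]
              have hv : pvBest down right 0 j + pvIdx2 right 0 (j : Int)
                  = pvBest down right 0 (j+1) := by
                rw [pvBest_0S, pvIdx2, PySem.List.pyGetD_natCast, PySem.List.pyGetD_ofNat', pvG]
              refine ⟨hv, ?_⟩
              rw [hv]
              have h := pvInv_insert h2 0 (j+1)
              simpa using h
      | i+1, 0 =>
          cases hget : memo.get? (((i+1:Nat) : Int), ((0:Nat) : Int)) with
          | some v =>
              rw [pvBestMemo.eq_def]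
              simp only [hget]
              exact ⟨hinv (i+1) 0 v hget, hinv⟩
          | none =>
              obtain ⟨h1, h2⟩ := ih i 0 (by omega) memo hinv
              rw [pvBestMemo.eq_def]
              simp only [hget, h1]
              have hv : pvBest down right i 0 + pvIdx2 down (i : Int) 0
                  = pvBest down right (i+1) 0 := by
                rw [pvBest_S0, pvIdx2, PySem.List.pyGetD_natCast, PySem.List.pyGetD_ofNat', pvG]
              refine ⟨hv, ?_⟩
              rw [hv]
              have h := pvInv_insert h2 (i+1) 0
              simpa using h
      | i+1, j+1 =>
          cases hget : memo.get? (((i+1:Nat) : Int), ((j+1:Nat) : Int)) with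
          | some v =>
              rw [pvBestMemo.eq_def]
              simp only [hget]
              exact ⟨hinv (i+1) (j+1) v hget, hinv⟩
          | none =>
              obtain ⟨h1, h2⟩ := ih i (j+1) (by omega) memo hinv
              obtain ⟨h3, h4⟩ := ih (i+1) j (by omega) _ h2
              rw [pvBestMemo.eq_def]
              simp only [hget, h1, h3]
              have hv : max (pvBest down right i (j+1) + pvIdx2 down (i : Int) ((j : Int)+1))
                            (pvBest down right (i+1) j + pvIdx2 right ((i : Int)+1) (j : Int))
                  = pvBest down right (i+1) (j+1) := by
                rw [pvBest_SS, pvIdx2, pvIdx2, PySem.List.pyGetD_natCast,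
                  show ((j:Int)+1) = ((j+1:Nat):Int) by push_cast; ring,
                  show ((i:Int)+1) = ((i+1:Nat):Int) by push_cast; ring,
                  PySem.List.pyGetD_natCast, PySem.List.pyGetD_natCast, PySem.List.pyGetD_natCast]
                rfl
              refine ⟨hv, ?_⟩
              rw [hv]
              have h := pvInv_insert h4 (i+1) (j+1)
              simpa using h

theorem alt_value (n m : Int) (down right : List (List Int)) :
    manhatan_tourist_alt n m down right = pvBest down right n.toNat m.toNat := by
  unfold manhatan_tourist_alt
  exact (pvBestMemo_correct down right (n.toNat + m.toNat) n.toNat m.toNat rfl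
    PySem.Dict.empty (pvInv_empty down right)).1

-- ===== A-side: the table holds pvBest after the three loops =====

theorem loop1_inv (down right : List (List Int)) (N M : Nat) :
    ∀ k, k ≤ M →
      pvShape ((List.range k).foldl (pvStep1 right) (pvInit N M)) N M ∧
      ∀ i j : Nat, pvG ((List.range k).foldl (pvStep1 right) (pvInit N M)) i j
        = if i = 0 ∧ j ≤ k then pvBest down right 0 j else 0 := by
  intro k
  induction k with
  | zero =>
      intro _
      simp only [List.range_zero, List.foldl_nil]
      refine ⟨pvShape_init N M, ?_⟩
      intro i j
      rw [pvG_init]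
      split_ifs with h
      · obtain ⟨rfl, hj⟩ := h
        have : j = 0 := by omega
        subst this
        rw [pvBest_00]
      · rfl
  | succ k ih =>
      intro hk
      obtain ⟨hsh, hg⟩ := ih (by omega)
      rw [List.range_succ (n := k), List.foldl_append]
      simp only [List.foldl_cons, List.foldl_nil]
      set A := (List.range k).foldl (pvStep1 right) (pvInit N M) with hA
      have hstep : pvStep1 right A k = pvSetG A 0 (k+1) (pvG A 0 k + pvG right 0 k) := rfl
      refine ⟨hstep ▸ pvShape_setG hsh _ _ _, ?_⟩
      intro i j
      rw [hstep, pvG_setG]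
      have hlen := hsh.1
      have hrl := hsh.2 0 (by omega)
      have hval : pvG A 0 k = pvBest down right 0 k := by rw [hg]; simp
      by_cases hij : i = 0 ∧ j = k+1
      · obtain ⟨rfl, rfl⟩ := hij
        rw [if_pos ⟨rfl, rfl, by omega, by omega⟩, if_pos ⟨rfl, by omega⟩, hval, pvBest_0S]
      · rw [if_neg (fun h => hij ⟨h.1, h.2.1⟩), hg]
        have hij' : ¬(i = 0 ∧ j = k+1) := hij
        split_ifs <;> first | rfl | omega

theorem loop2_inv (down right : List (List Int)) (N M : Nat) (a : List (List Int))
    (hsh : pvShape a N M)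
    (hg : ∀ i j : Nat, pvG a i j = if i = 0 ∧ j ≤ M then pvBest down right 0 j else 0) :
    ∀ k, k ≤ N →
      pvShape ((List.range k).foldl (pvStep2 down) a) N M ∧
      ∀ i j : Nat, pvG ((List.range k).foldl (pvStep2 down) a) i j
        = if i = 0 ∧ j ≤ M then pvBest down right 0 j
          else if j = 0 ∧ i ≤ k then pvBest down right i 0 else 0 := by
  intro k
  induction k with
  | zero =>
      intro _
      simp only [List.range_zero, List.foldl_nil]
      refine ⟨hsh, ?_⟩
      intro i j
      rw [hg]
      split_ifs with c1 c2
      · rfl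
      · exfalso; omega
      · rfl
  | succ k ih =>
      intro hk
      obtain ⟨hsh', hg'⟩ := ih (by omega)
      rw [List.range_succ (n := k), List.foldl_append]
      simp only [List.foldl_cons, List.foldl_nil]
      set A := (List.range k).foldl (pvStep2 down) a with hA
      have hstep : pvStep2 down A k = pvSetG A (k+1) 0 (pvG A k 0 + pvG down k 0) := rfl
      refine ⟨hstep ▸ pvShape_setG hsh' _ _ _, ?_⟩
      intro i j
      rw [hstep, pvG_setG]
      have hlen := hsh'.1
      have hrl := hsh'.2 (k+1) (by omega)
      have hval : pvG A k 0
          = pvBest down right k 0 := by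
        rw [hg']
        rcases Nat.eq_zero_or_pos k with rfl | hkpos
        · simp
        · rw [if_neg (by omega), if_pos ⟨rfl, by omega⟩]
      by_cases hij : i = k+1 ∧ j = 0
      · obtain ⟨rfl, rfl⟩ := hij
        rw [if_pos ⟨rfl, rfl, by omega, by omega⟩, if_neg (by omega),
          if_pos ⟨rfl, by omega⟩, hval, pvBest_S0]
      · rw [if_neg (fun h => hij ⟨h.1, h.2.1⟩), hg']
        have hij' : ¬(i = k+1 ∧ j = 0) := hij
        split_ifs <;> first | rfl | omega

def pvF3 (down right : List (List Int)) (N M k i j : Nat) : Int :=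
  if i ≤ k ∧ j ≤ M then pvBest down right i j
  else if j = 0 ∧ i ≤ N then pvBest down right i 0 else 0

theorem inner3_inv (down right : List (List Int)) (N M : Nat) (t : Nat) (ht : t < N)
    (a : List (List Int)) (hsh : pvShape a N M)
    (hg : ∀ i j : Nat, pvG a i j = pvF3 down right N M t i j) :
    ∀ s, s ≤ M →
      pvShape ((List.range s).foldl (pvStep3 down right t) a) N M ∧
      ∀ i j : Nat, pvG ((List.range s).foldl (pvStep3 down right t) a) i j
        = if i = t+1 ∧ 1 ≤ j ∧ j ≤ s then pvBest down right (t+1) j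
          else pvF3 down right N M t i j := by
  intro s
  induction s with
  | zero =>
      intro _
      simp only [List.range_zero, List.foldl_nil]
      refine ⟨hsh, ?_⟩
      intro i j
      rw [hg, if_neg (by omega)]
  | succ s ih =>
      intro hs
      obtain ⟨hsh', hg'⟩ := ih (by omega)
      rw [List.range_succ (n := s), List.foldl_append]
      simp only [List.foldl_cons, List.foldl_nil]
      set A := (List.range s).foldl (pvStep3 down right t) a with hA
      have hstep : pvStep3 down right t A s
          = pvSetG A (t+1) (s+1) (max (pvG A t (s+1) + pvG down t (s+1))
              (pvG A (t+1) s + pvG right (t+1) s)) := rfl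
      refine ⟨hstep ▸ pvShape_setG hsh' _ _ _, ?_⟩
      intro i j
      rw [hstep, pvG_setG]
      have hlen := hsh'.1
      have hrl := hsh'.2 (t+1) (by omega)
      have hval1 : pvG A t (s+1)
          = pvBest down right t (s+1) := by
        rw [hg', if_neg (by omega)]
        unfold pvF3
        rw [if_pos ⟨le_refl t, by omega⟩]
      have hval2 : pvG A (t+1) s
          = pvBest down right (t+1) s := by
        rw [hg']
        rcases Nat.eq_zero_or_pos s with rfl | hspos
        · rw [if_neg (by omega)]
          unfold pvF3
          rw [if_neg (by omega), if_pos ⟨rfl, by omega⟩]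
        · rw [if_pos ⟨rfl, by omega, le_refl s⟩]
      by_cases hij : i = t+1 ∧ j = s+1
      · obtain ⟨rfl, rfl⟩ := hij
        rw [if_pos ⟨rfl, rfl, by omega, by omega⟩, if_pos ⟨rfl, by omega, le_refl _⟩,
          hval1, hval2, pvBest_SS]
      · rw [if_neg (fun h => hij ⟨h.1, h.2.1⟩), hg']
        have hij' : ¬(i = t+1 ∧ j = s+1) := hij
        split_ifs <;> first | rfl | omega

theorem fin_to_f3 (down right : List (List Int)) (N M k : Nat) (hk : k+1 ≤ N) (i j : Nat) :
    (if i = k+1 ∧ 1 ≤ j ∧ j ≤ M then pvBest down right (k+1) j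
     else pvF3 down right N M k i j) = pvF3 down right N M (k+1) i j := by
  by_cases hj : j = 0
  · subst hj
    unfold pvF3
    split_ifs <;> first | rfl | omega
  · by_cases h : i = k+1
    · subst h
      unfold pvF3
      split_ifs <;> first | rfl | omega
    · unfold pvF3
      rw [if_neg (fun hh => h hh.1)]
      split_ifs <;> first | rfl | omega

theorem outer3_inv (down right : List (List Int)) (N M : Nat) (a : List (List Int))
    (hsh : pvShape a N M)
    (hg : ∀ i j : Nat, pvG a i j = pvF3 down right N M 0 i j) :
    ∀ k, k ≤ N →
      pvShape ((List.range k).foldl (pvOuter3 down right M) a) N M ∧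
      ∀ i j : Nat, pvG ((List.range k).foldl (pvOuter3 down right M) a) i j
        = pvF3 down right N M k i j := by
  intro k
  induction k with
  | zero =>
      intro _
      simp only [List.range_zero, List.foldl_nil]
      exact ⟨hsh, hg⟩
  | succ k ih =>
      intro hk
      obtain ⟨hsh', hg'⟩ := ih (by omega)
      rw [List.range_succ (n := k), List.foldl_append]
      simp only [List.foldl_cons, List.foldl_nil]
      have hstep : pvOuter3 down right M ((List.range k).foldl (pvOuter3 down right M) a) k
          = (List.range M).foldl (pvStep3 down right k)
              ((List.range k).foldl (pvOuter3 down right M) a) := rfl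
      rw [hstep]
      obtain ⟨hsh'', hg''⟩ := inner3_inv down right N M k (by omega) _ hsh' hg' M (le_refl M)
      refine ⟨hsh'', ?_⟩
      intro i j
      rw [hg'']
      exact fin_to_f3 down right N M k hk i j

theorem f2_to_f3 (down right : List (List Int)) (N M : Nat) (i j : Nat) :
    (if i = 0 ∧ j ≤ M then pvBest down right 0 j
     else if j = 0 ∧ i ≤ N then pvBest down right i 0 else 0)
      = pvF3 down right N M 0 i j := by
  by_cases h : i = 0
  · subst h
    unfold pvF3
    split_ifs <;> first | rfl | omega
  · unfold pvF3
    rw [if_neg (fun hh => h hh.1)]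
    split_ifs <;> first | rfl | omega

theorem a_value (n m : Int) (down right : List (List Int)) (hn : 0 ≤ n) (hm : 0 ≤ m) :
    manhatan_tourist n m down right = pvBest down right n.toNat m.toNat := by
  rw [a_norm n m down right hn hm]
  obtain ⟨hsh1, hg1⟩ := loop1_inv down right n.toNat m.toNat m.toNat (le_refl _)
  obtain ⟨hsh2, hg2⟩ := loop2_inv down right n.toNat m.toNat _ hsh1 hg1 n.toNat (le_refl _)
  obtain ⟨hsh3, hg3⟩ := outer3_inv down right n.toNat m.toNat _ hsh2
    (fun i j => by rw [hg2]; exact f2_to_f3 down right n.toNat m.toNat i j) n.toNat (le_refl _)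
  rw [hg3]
  unfold pvF3
  rw [if_pos ⟨le_refl _, le_refl _⟩]

-- ===== VERDICT (by name: the statement is the Claim_ definition above) =====
theorem manhatan_tourist_spec : Claim_equal_manhatan_tourist := by
  unfold Claim_equal_manhatan_tourist
  intro n m down right _ hpre
  obtain ⟨hn, hm, -⟩ := hpre
  unfold Spec_manhatan_tourist
  rw [a_value n m down right hn hm, alt_value n m down right]
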